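-- pv_equiv track=rewrite | github.com/taeyouth/event_driven_trading | src/eventing/event_normalizer.py | _classify_event_type
-- ===== SOURCE A (Python) =====
-- from typing import List, Dict
--
-- def _classify_event_type(title: str, summary: str, rules: Dict[str, List[str]]) -> str:
--     text = f"{title} {summary}"
--     text = text.lower()
--     for etype, kws in rules.items():
--         for kw in kws:
--             if kw.lower() in text:
--                 return etype
--     return "other"
-- ===== SOURCE B (Python) =====
-- from typing import List, Dict
--
-- def _classify_event_type(title: str, summary: str, rules: Dict[str, List[str]]) -> str:
--     text = f"{title} {summary}".lower()
--     keys = list(rules.keys())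
--     pats = [(kw.lower(), i) for i, kws in enumerate(rules.values()) for kw in kws]
--     index = {}  # keyword length -> set of all substrings of text of that length
--     for pat, _ in pats:
--         n = len(pat)
--         if n not in index:
--             index[n] = {text[pos:pos + n] for pos in range(len(text) - n + 1)}
--     best = len(keys)
--     for pat, i in pats:
--         if i < best and pat in index[len(pat)]:
--             best = i
--     return keys[best] if best < len(keys) else "other"
-- ===== Notes on version B (the rewrite author's own statement) =====
-- stated objective: alternative
-- what changed: Replaces A's rule-major nested loops of per-keyword substring searches ('kw in text' with early return) by a staged hash-index algorithm: flatten all lowered keywords into one (pattern, rule-index) list, build per distinct keyword length the set of all text substrings of that length, then one pass over the flattened list accumulates the minimal matched rule index (the first rule in dict order with a match is exactly the rule of minimal matched index); substring searches become set lookups.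
import Mathlib
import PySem

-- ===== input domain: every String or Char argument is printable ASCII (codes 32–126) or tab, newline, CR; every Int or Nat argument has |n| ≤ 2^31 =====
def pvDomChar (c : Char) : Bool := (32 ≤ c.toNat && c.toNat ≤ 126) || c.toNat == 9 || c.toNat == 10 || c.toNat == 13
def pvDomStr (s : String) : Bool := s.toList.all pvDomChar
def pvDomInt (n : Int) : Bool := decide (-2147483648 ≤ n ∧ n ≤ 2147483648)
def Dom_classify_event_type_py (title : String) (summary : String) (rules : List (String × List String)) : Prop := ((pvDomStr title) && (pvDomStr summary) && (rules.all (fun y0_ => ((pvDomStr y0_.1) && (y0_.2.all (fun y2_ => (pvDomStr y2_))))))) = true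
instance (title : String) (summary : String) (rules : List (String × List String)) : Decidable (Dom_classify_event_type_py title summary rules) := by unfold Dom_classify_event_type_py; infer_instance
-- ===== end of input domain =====

-- B replaces A's per-keyword substring scans by a staged hash-index: per distinct keyword length the set
-- of all text substrings of that length is built once, then one pass over the flattened (pattern, rule
-- index) list keeps the minimal rule index whose pattern is in the index; alternative structure.


-- ===== PORT A =====
-- inner loop: 'for kw in kws: if kw.lower() in text: return etype' (as a Bool: did some kw match?)
def pvA_inner (text : List Char) : List String → Bool
  | [] => false
  | kw :: rest =>
    if PySem.Chars.isIn (PySem.Chars.lower kw.toList) text then true else pvA_inner text rest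

-- outer loop: 'for etype, kws in rules.items(): … return etype' / 'return "other"'
def pvA_outer (text : List Char) : List (String × List String) → String
  | [] => "other"
  | (etype, kws) :: rest => if pvA_inner text kws then etype else pvA_outer text rest

def classify_event_type_py (title : String) (summary : String) (rules : List (String × List String)) : String :=
  -- text = f"{title} {summary}"; text = text.lower()  (string concat done on the Char-list side, exact)
  let text := PySem.Chars.lower (title.toList ++ ' ' :: summary.toList)
  pvA_outer text (PySem.Dict.ofList rules).items

-- ===== PORT B =====
-- pats = [(kw.lower(), i) for i, kws in enumerate(rules.values()) for kw in kws]
def pvB_pats (values : List (List String)) : List (List Char × Int) :=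
  (PySem.List.enumerate values 0).flatMap (fun p => p.2.map (fun kw => (PySem.Chars.lower kw.toList, p.1)))

-- {text[pos:pos+n] for pos in range(len(text) - n + 1)}
-- (range over the int len(text)-n+1 ported via .toNat: empty when the bound is ≤ 0, as in Python;
--  the slice text[pos:pos+n] with 0 ≤ pos and 0 ≤ n is exactly (drop pos).take n, clamping included)
def pvB_subs (text : List Char) (n : Nat) : PySem.Set (List Char) :=
  PySem.Set.ofList ((List.range (((text.length : Int) - (n : Int) + 1).toNat)).map
    (fun pos => (text.drop pos).take n))

-- for pat, _ in pats: n = len(pat); if n not in index: index[n] = {…}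
def pvB_index (text : List Char) (pats : List (List Char × Int)) :
    PySem.Dict Int (PySem.Set (List Char)) :=
  pats.foldl
    (fun idx q =>
      if idx.contains ((q.1.length : Nat) : Int) then idx
      else idx.insert ((q.1.length : Nat) : Int) (pvB_subs text q.1.length))
    PySem.Dict.empty

def classify_event_type_py_alt (title : String) (summary : String) (rules : List (String × List String)) : String :=
  let text := PySem.Chars.lower (title.toList ++ ' ' :: summary.toList)
  let d := PySem.Dict.ofList rules
  let keys := d.keys
  let pats := pvB_pats d.values
  let index := pvB_index text pats
  -- for pat, i in pats: if i < best and pat in index[len(pat)]: best = i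
  -- (index[len(pat)] always hits: the key was inserted by the build loop; ported as getD,
  --  the default is unreachable)
  let best := pats.foldl
    (fun best q =>
      if q.2 < best && PySem.Set.contains (index.getD ((q.1.length : Nat) : Int) PySem.Set.empty) q.1
      then q.2 else best)
    (keys.length : Int)
  -- return keys[best] if best < len(keys) else "other"   (best is then a valid nonnegative index)
  if best < (keys.length : Int) then PySem.List.pyGetD keys best "other" else "other"

-- ===== PRECONDITION & SPEC =====
def Spec_classify_event_type_py (title : String) (summary : String) (rules : List (String × List String)) (out : String) : Prop := out = classify_event_type_py_alt title summary rules
instance (title : String) (summary : String) (rules : List (String × List String)) (out : String) : Decidable (Spec_classify_event_type_py title summary rules out) := by unfold Spec_classify_event_type_py; infer_instance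

-- ===== CLAIM (what is proved, stated in full; the proofs are below) =====
def Claim_equal_classify_event_type_py : Prop := ∀ (title : String) (summary : String) (rules : List (String × List String)), Dom_classify_event_type_py title summary rules → Spec_classify_event_type_py title summary rules (classify_event_type_py title summary rules)

-- ===== LEMMAS AND PROOFS =====

theorem pvA_inner_eq_any (text : List Char) (kws : List String) :
    pvA_inner text kws
      = kws.any (fun kw => PySem.Chars.isIn (PySem.Chars.lower kw.toList) text) := by
  induction kws with
  | nil => rfl
  | cons kw rest ih => simp [pvA_inner, ih]

-- A returns "other" when no rule matches
theorem pvA_outer_none (text : List Char) (l : List (String × List String))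
    (h : ∀ p ∈ l, pvA_inner text p.2 = false) : pvA_outer text l = "other" := by
  induction l with
  | nil => rfl
  | cons p rest ih =>
    obtain ⟨etype, kws⟩ := p
    have h0 := h (etype, kws) (List.mem_cons_self ..)
    simp only [pvA_outer, h0, Bool.false_eq_true, if_false]
    exact ih (fun q hq => h q (List.mem_cons_of_mem _ hq))

-- A returns the key of the FIRST matching rule
theorem pvA_outer_idx (text : List Char) :
    ∀ (l : List (String × List String)) (i : Nat) (hi : i < l.length),
      pvA_inner text (l[i]).2 = true →
      (∀ j (hj : j < i), pvA_inner text (l[j]'(by omega)).2 = false) →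
      pvA_outer text l = (l[i]).1 := by
  intro l
  induction l with
  | nil => intro i hi; simp at hi
  | cons p rest ih =>
    intro i hi hhit hmin
    obtain ⟨etype, kws⟩ := p
    cases i with
    | zero =>
      simp only [List.getElem_cons_zero] at hhit ⊢
      simp [pvA_outer, hhit]
    | succ i' =>
      have h0 : pvA_inner text kws = false := by
        have := hmin 0 (by omega); simpa using this
      simp only [pvA_outer, h0, Bool.false_eq_true, if_false]
      have := ih i' (by simpa using hi)
        (by simpa using hhit)
        (fun j hj => by
          have := hmin (j + 1) (by omega)
          simpa using this)
      simpa using this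

-- step function of B's min loop = conditional min
theorem pv_step_eq (p : List Char × Int → Bool) :
    (fun (b : Int) (q : List Char × Int) => if q.2 < b && p q then q.2 else b)
      = fun b q => if p q then min b q.2 else b := by
  funext b q
  by_cases h : p q <;>
    simp [h, Int.min_def]
  omega

-- a min-fold's result: it is the initial value or an admitted element, ≤ the initial value,
-- and ≤ every admitted element
theorem pv_fold_min_props {α : Type} (p : α → Bool) (g : α → Int) :
    ∀ (L : List α) (init : Int),
      (L.foldl (fun b x => if p x then min b (g x) else b) init = init ∨
        ∃ x ∈ L, p x = true ∧ L.foldl (fun b x => if p x then min b (g x) else b) init = g x)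
      ∧ L.foldl (fun b x => if p x then min b (g x) else b) init ≤ init
      ∧ ∀ x ∈ L, p x = true → L.foldl (fun b x => if p x then min b (g x) else b) init ≤ g x := by
  intro L
  induction L with
  | nil => intro init; exact ⟨Or.inl rfl, le_refl _, by simp⟩
  | cons a L ih =>
    intro init
    simp only [List.foldl_cons]
    obtain ⟨hmem, hle, hall⟩ := ih (if p a then min init (g a) else init)
    have hle' : (if p a then min init (g a) else init) ≤ init := by
      split <;> simp
    refine ⟨?_, hle.trans hle', ?_⟩
    · rcases hmem with h | ⟨x, hx, hpx, hval⟩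
      · by_cases hpa : p a
        · rcases le_total init (g a) with hc | hc
          · exact Or.inl (by rw [h, if_pos hpa, min_eq_left hc])
          · exact Or.inr ⟨a, List.mem_cons_self .., hpa, by rw [h, if_pos hpa, min_eq_right hc]⟩
        · exact Or.inl (by simp only [if_neg hpa] at h ⊢; exact h)
      · exact Or.inr ⟨x, List.mem_cons_of_mem _ hx, hpx, hval⟩
    · intro x hx hpx
      rcases List.mem_cons.mp hx with rfl | hx'
      · have : (if p x then min init (g x) else init) ≤ g x := by
          rw [if_pos hpx]; exact min_le_right _ _
        exact hle.trans this
      · exact hall x hx' hpx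

-- membership in the flattened pattern list
theorem pv_mem_pats (values : List (List String)) (pat : List Char) (i : Int) :
    (pat, i) ∈ pvB_pats values
      ↔ ∃ (k : Nat) (hk : k < values.length),
          i = (k : Int) ∧ ∃ kw ∈ values[k], pat = PySem.Chars.lower kw.toList := by
  unfold pvB_pats
  simp only [List.mem_flatMap, PySem.List.mem_enumerate_iff]
  constructor
  · rintro ⟨p, ⟨k, hk, rfl⟩, hmem⟩
    simp only [List.mem_map, Prod.mk.injEq] at hmem
    obtain ⟨kw, hkw, hpat, hi⟩ := hmem
    exact ⟨k, hk, by omega, kw, hkw, hpat.symm⟩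
  · rintro ⟨k, hk, rfl, kw, hkw, rfl⟩
    exact ⟨((k : Int), values[k]), ⟨k, hk, by simp⟩, by
      simp only [List.mem_map]; exact ⟨kw, hkw, by simp⟩⟩

-- a pattern is in the substring set of its own length iff it is a substring of the text
theorem pv_subs_contains (t : List Char) (pat : List Char) :
    PySem.Set.contains (pvB_subs t pat.length) pat = PySem.Chars.isIn pat t := by
  rw [Bool.eq_iff_iff, PySem.Set.contains_iff]
  unfold pvB_subs
  rw [PySem.Set.mem_ofList, List.mem_map]
  constructor
  · rintro ⟨pos, _, hEq⟩
    exact (PySem.Chars.exists_prefix_drop_iff_isIn _ _).mp ⟨pos, hEq ▸ List.take_prefix _ _⟩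
  · intro hin
    obtain ⟨j, hj⟩ := (PySem.Chars.exists_prefix_drop_iff_isIn _ _).mpr hin
    have h1 := hj.length_le
    rw [List.length_drop] at h1
    rcases Nat.le_total j t.length with hc | hc
    · refine ⟨j, List.mem_range.mpr (by omega), ?_⟩
      exact (List.prefix_iff_eq_take.mp hj).symm
    · have hnil : t.drop j = [] := List.drop_eq_nil_of_le hc
      have hpat : pat = [] := List.prefix_nil.mp (hnil ▸ hj)
      refine ⟨t.length, List.mem_range.mpr (by simp [hpat]), ?_⟩
      rw [hpat]
      simp

-- every value stored by the index-build loop is the substring set of its key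
theorem pv_index_get? (t : List Char) :
    ∀ (ps : List (List Char × Int)) (d : PySem.Dict Int (PySem.Set (List Char))),
      (∀ (k : Int) (s : PySem.Set (List Char)), d.get? k = some s → s = pvB_subs t k.toNat) →
      ∀ (k : Int) (s : PySem.Set (List Char)),
        (ps.foldl
          (fun idx q =>
            if idx.contains ((q.1.length : Nat) : Int) then idx
            else idx.insert ((q.1.length : Nat) : Int) (pvB_subs t q.1.length)) d).get? k = some s →
        s = pvB_subs t k.toNat := by
  intro ps
  induction ps with
  | nil => intro d hd; exact hd
  | cons q ps ih =>
    intro d hd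
    simp only [List.foldl_cons]
    apply ih
    intro k s hk
    split at hk
    · exact hd k s hk
    · rw [PySem.Dict.get?_insert] at hk
      split at hk
      · obtain ⟨rfl⟩ : s = pvB_subs t q.1.length := by simpa using hk.symm
        simp_all
      · exact hd k s hk

-- the build loop never removes a key
theorem pv_index_contains_mono (t : List Char) :
    ∀ (ps : List (List Char × Int)) (d : PySem.Dict Int (PySem.Set (List Char))) (k : Int),
      d.contains k = true →
      (ps.foldl
        (fun idx q =>
          if idx.contains ((q.1.length : Nat) : Int) then idx
          else idx.insert ((q.1.length : Nat) : Int) (pvB_subs t q.1.length)) d).contains k = true := by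
  intro ps
  induction ps with
  | nil => intro d k hk; exact hk
  | cons q ps ih =>
    intro d k hk
    simp only [List.foldl_cons]
    apply ih
    split
    · exact hk
    · rw [PySem.Dict.contains_insert, hk, Bool.or_true]

-- after the build loop, every pattern's length is a key
theorem pv_index_contains (t : List Char) :
    ∀ (ps : List (List Char × Int)) (d : PySem.Dict Int (PySem.Set (List Char))) (q : List Char × Int),
      q ∈ ps →
      (ps.foldl
        (fun idx q =>
          if idx.contains ((q.1.length : Nat) : Int) then idx
          else idx.insert ((q.1.length : Nat) : Int) (pvB_subs t q.1.length)) d).contains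
        ((q.1.length : Nat) : Int) = true := by
  intro ps
  induction ps with
  | nil => intro d q hq; simp at hq
  | cons a ps ih =>
    intro d q hq
    simp only [List.foldl_cons]
    rcases List.mem_cons.mp hq with rfl | hq'
    · apply pv_index_contains_mono
      split
      · assumption
      · exact PySem.Dict.contains_insert_self ..
    · exact ih _ q hq'

-- pvB_index is its defining fold (bridge for the generalized-accumulator lemmas above)
theorem pvB_index_eq (t : List Char) (ps : List (List Char × Int)) :
    pvB_index t ps
      = ps.foldl
          (fun idx q =>
            if idx.contains ((q.1.length : Nat) : Int) then idx
            else idx.insert ((q.1.length : Nat) : Int) (pvB_subs t q.1.length))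
          PySem.Dict.empty := rfl

-- hence the lookup in B's min loop is exactly the substring set of the pattern's length
theorem pv_index_getD (t : List Char) (ps : List (List Char × Int)) (q : List Char × Int)
    (hq : q ∈ ps) :
    (pvB_index t ps).getD ((q.1.length : Nat) : Int) PySem.Set.empty = pvB_subs t q.1.length := by
  have hc := pv_index_contains t ps PySem.Dict.empty q hq
  rw [← pvB_index_eq] at hc
  rcases h : (pvB_index t ps).get? ((q.1.length : Nat) : Int) with _ | s
  · rw [PySem.Dict.contains_eq_isSome_get?, h] at hc
    simp at hc
  · have h' := h
    rw [pvB_index_eq] at h'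
    have hv := pv_index_get? t ps PySem.Dict.empty
      (fun k s hks => by simp [PySem.Dict.get?_empty] at hks) _ _ h'
    rw [PySem.Dict.getD_eq_get?_getD, h]
    simpa using hv

-- the minimal-index fold of B, as a function of text and item list
def pvBestOf (t : List Char) (l : List (String × List String)) : Int :=
  (pvB_pats (l.map (·.2))).foldl
    (fun best q =>
      if q.2 < best && PySem.Set.contains
          ((pvB_index t (pvB_pats (l.map (·.2)))).getD ((q.1.length : Nat) : Int) PySem.Set.empty) q.1
      then q.2 else best)
    (((l.map (·.1)).length : Nat) : Int)

-- the central equivalence, over an arbitrary text and item list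
theorem pv_central (t : List Char) (l : List (String × List String)) :
    pvA_outer t l =
      (if pvBestOf t l < (((l.map (·.1)).length : Nat) : Int)
       then PySem.List.pyGetD (l.map (·.1)) (pvBestOf t l) "other" else "other") := by
  have hlen : (l.map (·.1)).length = l.length := List.length_map ..
  set pats := pvB_pats (l.map (·.2)) with hpats
  -- the lookup is the substring set; then the step is a conditional min
  have hbest : pvBestOf t l
      = pats.foldl (fun b q => if PySem.Chars.isIn q.1 t then min b q.2 else b) ((l.length : Int)) := by
    unfold pvBestOf
    rw [hlen, ← hpats]
    rw [PySem.List.foldl_congr_mem _ _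
      (fun (b : Int) (q : List Char × Int) => if q.2 < b && PySem.Chars.isIn q.1 t then q.2 else b) _
      (fun acc x hx => by rw [pv_index_getD t pats x hx, pv_subs_contains])]
    rw [pv_step_eq (fun q => PySem.Chars.isIn q.1 t)]
  obtain ⟨hmem, hle, hall⟩ :=
    pv_fold_min_props (fun q : List Char × Int => PySem.Chars.isIn q.1 t)
      (fun q => q.2) pats ((l.length : Int))
  rw [← hbest] at hmem hle hall
  -- a matched pattern names a matching rule
  have hpair : ∀ q ∈ pats, PySem.Chars.isIn q.1 t = true →
      ∃ (k : Nat) (hk : k < l.length), q.2 = (k : Int) ∧ pvA_inner t (l[k]).2 = true := by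
    rintro ⟨pat, i⟩ hq hin
    rw [hpats] at hq
    obtain ⟨k, hk, rfl, kw, hkw, rfl⟩ := (pv_mem_pats _ _ _).mp hq
    rw [List.length_map] at hk
    refine ⟨k, hk, rfl, ?_⟩
    rw [pvA_inner_eq_any, List.any_eq_true]
    exact ⟨kw, by simpa using hkw, hin⟩
  -- a matching rule contributes a matched pattern
  have hrule : ∀ (k : Nat) (hk : k < l.length), pvA_inner t (l[k]).2 = true →
      ∃ q ∈ pats, PySem.Chars.isIn q.1 t = true ∧ q.2 = (k : Int) := by
    intro k hk hhit
    rw [pvA_inner_eq_any, List.any_eq_true] at hhit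
    obtain ⟨kw, hkw, hin⟩ := hhit
    refine ⟨(PySem.Chars.lower kw.toList, (k : Int)), ?_, hin, rfl⟩
    rw [hpats]
    exact (pv_mem_pats _ _ _).mpr ⟨k, by simpa using hk, rfl, kw, by simpa using hkw, rfl⟩
  by_cases hex : ∃ (i : Nat), (match l[i]? with | some p => pvA_inner t p.2 | none => false) = true
  · -- some rule matches; i0 = the first one
    set i0 := Nat.find hex with hi0
    have hspec := Nat.find_spec hex
    have hub : i0 < l.length := by
      by_contra hge
      rw [List.getElem?_eq_none (by omega)] at hspec
      simp at hspec
    have hhit : pvA_inner t (l[i0]).2 = true := by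
      rw [List.getElem?_eq_getElem hub] at hspec
      simpa using hspec
    -- A returns l[i0].1
    have hA : pvA_outer t l = (l[i0]).1 := by
      refine pvA_outer_idx t l i0 hub hhit (fun j hj => ?_)
      have hm := Nat.find_min hex hj
      rw [List.getElem?_eq_getElem (by omega)] at hm
      simpa using Bool.of_not_eq_true hm
    -- best = i0
    have hup : pvBestOf t l ≤ (i0 : Int) := by
      obtain ⟨q, hq, hin, hval⟩ := hrule i0 hub hhit
      have := hall q hq hin
      omega
    have hdown : (i0 : Int) ≤ pvBestOf t l := by
      rcases hmem with h | ⟨q, hq, hin, hval⟩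
      · omega
      · obtain ⟨k, hk, hvk, hhitk⟩ := hpair q hq hin
        have : i0 ≤ k := by
          refine Nat.find_min' hex ?_
          rw [List.getElem?_eq_getElem hk]
          simpa using hhitk
        omega
    have hbi : pvBestOf t l = (i0 : Int) := le_antisymm hup hdown
    rw [hA, hbi, hlen, if_pos (by exact_mod_cast hub)]
    rw [PySem.List.pyGetD_natCast]
    rw [List.getD_eq_getElem _ _ (by simpa using hub)]
    simp
  · -- no rule matches: A gives "other", best stays at len(keys)
    rw [not_exists] at hex
    have hnone : ∀ p ∈ l, pvA_inner t p.2 = false := by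
      intro p hp
      obtain ⟨k, hk, rfl⟩ := List.getElem_of_mem hp
      have hm := hex k
      rw [List.getElem?_eq_getElem hk] at hm
      simpa using Bool.of_not_eq_true hm
    have hbl : pvBestOf t l = (l.length : Int) := by
      rcases hmem with h | ⟨q, hq, hin, _⟩
      · exact h
      · obtain ⟨k, hk, _, hhitk⟩ := hpair q hq hin
        exact absurd (hnone _ (List.getElem_mem hk)) (by simp [hhitk])
    rw [pvA_outer_none t l hnone, hbl, hlen, if_neg (by omega)]

-- ===== VERDICT (by name: the statement is the Claim_ definition above) =====
theorem classify_event_type_py_spec : Claim_equal_classify_event_type_py := by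
  intro title summary rules _
  unfold Spec_classify_event_type_py classify_event_type_py classify_event_type_py_alt
  simp only [PySem.Dict.keys, PySem.Dict.values]
  exact pv_central _ _
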